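-- pv_equiv track=rewrite | github.com/knutole/catchfish | catchfish.py | _sort_depths_of_evaluation
-- ===== SOURCE A (Python) =====
-- def _sort_depths_of_evaluation(move):
--     depths = {}
--     for e in move["evaluation"]:
--         if "Nodes" in e:
--             d = e["Nodes"]
--             if d in depths:
--                 depths[d].append(e)
--             else:
--                 depths[d] = [e]
--     return depths
-- ===== SOURCE B (Python) =====
-- def _sort_depths_of_evaluation(move):
--     evs = [e for e in move["evaluation"] if "Nodes" in e]
--     keys = []
--     for e in evs:
--         k = e["Nodes"]
--         if k not in keys:
--             keys.append(k)
--     return {k: [e for e in evs if e["Nodes"] == k] for k in keys}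
-- ===== Notes on version B (the rewrite author's own statement) =====
-- stated objective: alternative
-- what changed: replaces the single-pass dict accumulation with a two-phase scheme: pre-filter the entries, dedup the Nodes keys in first-appearance order, then build each group by an independent filter pass per key
import Mathlib
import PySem

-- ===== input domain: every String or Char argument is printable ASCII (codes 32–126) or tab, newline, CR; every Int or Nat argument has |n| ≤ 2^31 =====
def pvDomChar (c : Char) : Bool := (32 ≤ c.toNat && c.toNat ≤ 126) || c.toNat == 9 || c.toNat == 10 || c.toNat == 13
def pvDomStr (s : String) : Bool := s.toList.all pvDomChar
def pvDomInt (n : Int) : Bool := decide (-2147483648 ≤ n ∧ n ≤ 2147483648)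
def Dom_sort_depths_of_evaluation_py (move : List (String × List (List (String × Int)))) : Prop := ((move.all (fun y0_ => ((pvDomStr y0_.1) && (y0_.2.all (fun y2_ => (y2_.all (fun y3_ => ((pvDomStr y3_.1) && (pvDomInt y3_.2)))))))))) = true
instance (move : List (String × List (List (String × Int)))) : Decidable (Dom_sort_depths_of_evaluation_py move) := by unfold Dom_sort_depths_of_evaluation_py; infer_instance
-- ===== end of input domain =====

-- B replaces A's single-pass dict accumulation by a two-phase scheme (pre-filter, ordered
-- key dedup, then one filter pass per distinct key); objective: alternative (not faster).

-- ===== PORT A =====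
-- literal port of A: one pass over move["evaluation"], growing a dict of lists
def sort_depths_of_evaluation_py (move : List (String × List (List (String × Int)))) : List (Int × List (List (String × Int))) :=
  match (PySem.Dict.mk move).get? "evaluation" with
  | none => []   -- KeyError in Python; excluded by Pre_
  | some evs =>
    (evs.foldl (fun depths e =>
      if (PySem.Dict.mk e).contains "Nodes" then
        let d := (PySem.Dict.mk e).getD "Nodes" 0
        if depths.contains d then
          depths.insert d (depths.getD d [] ++ [e])    -- depths[d].append(e)
        else
          depths.insert d [e]                           -- depths[d] = [e]
      else depths) PySem.Dict.empty).items

-- ===== PORT B =====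
-- literal port of B: filter, dedup keys in first-appearance order, one filter per key
def sort_depths_of_evaluation_py_alt (move : List (String × List (List (String × Int)))) : List (Int × List (List (String × Int))) :=
  match (PySem.Dict.mk move).get? "evaluation" with
  | none => []   -- KeyError in Python; excluded by Pre_
  | some evs0 =>
    let evs := evs0.filter (fun e => (PySem.Dict.mk e).contains "Nodes")
    let keys := evs.foldl (fun ks e => PySem.Set.add ks ((PySem.Dict.mk e).getD "Nodes" 0)) ([] : PySem.Set Int)
    keys.map (fun k => (k, evs.filter (fun e => (PySem.Dict.mk e).getD "Nodes" 0 == k)))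

-- ===== PRECONDITION & SPEC =====
-- Pre_ excludes exactly the inputs without an "evaluation" key, on which Python A raises KeyError.
def Pre_sort_depths_of_evaluation_py (move : List (String × List (List (String × Int)))) : Prop :=
  (move.any (fun p => p.1 == "evaluation")) = true
instance (move : List (String × List (List (String × Int)))) : Decidable (Pre_sort_depths_of_evaluation_py move) := by unfold Pre_sort_depths_of_evaluation_py; infer_instance
def pvWitness_sort_depths_of_evaluation_py : (List (String × List (List (String × Int)))) :=
  [("evaluation", [[("Nodes", 2), ("x", 1)], [("y", 3)], [("Nodes", 1)], [("Nodes", 2)]])]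
def Spec_sort_depths_of_evaluation_py (move : List (String × List (List (String × Int)))) (out : List (Int × List (List (String × Int)))) : Prop := out = sort_depths_of_evaluation_py_alt move
instance (move : List (String × List (List (String × Int)))) (out : List (Int × List (List (String × Int)))) : Decidable (Spec_sort_depths_of_evaluation_py move out) := by unfold Spec_sort_depths_of_evaluation_py; infer_instance

-- ===== CLAIM (what is proved, stated in full; the proofs are below) =====
def Claim_equal_sort_depths_of_evaluation_py : Prop := ∀ (move : List (String × List (List (String × Int)))), Dom_sort_depths_of_evaluation_py move → Pre_sort_depths_of_evaluation_py move → Spec_sort_depths_of_evaluation_py move (sort_depths_of_evaluation_py move)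

-- ===== LEMMAS AND PROOFS =====

-- key of an evaluation entry
def pvKey (e : List (String × Int)) : Int := (PySem.Dict.mk e).getD "Nodes" 0

-- a guarded fold is a fold over the filtered list
theorem pv_foldl_guard {α β : Type} (p : α → Bool) (f : β → α → β) :
    ∀ (l : List α) (d : β),
      l.foldl (fun d e => if p e then f d e else d) d = (l.filter p).foldl f d := by
  intro l
  induction l with
  | nil => intro d; rfl
  | cons a t ih =>
    intro d
    by_cases h : p a = true
    · simp [h, ih]
    · simp [h, ih]

theorem pv_not_contains_getD (depths : PySem.Dict Int (List (List (String × Int))))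
    (k : Int) (e : List (String × Int)) (h : depths.contains k = false) :
    depths.insert k [e] = depths.insert k (depths.getD k [] ++ [e]) := by
  have : depths.getD k [] = [] := PySem.Dict.getD_of_not_contains depths [] h
  rw [this]; rfl

-- A's if-contains-append-else-new branch is exactly Dict.modify with default []
theorem pv_branch_eq_modify (depths : PySem.Dict Int (List (List (String × Int))))
    (k : Int) (e : List (String × Int)) :
    (if depths.contains k then depths.insert k (depths.getD k [] ++ [e])
     else depths.insert k [e]) = depths.modify k [] (· ++ [e]) := by
  by_cases h : depths.contains k = true
  · simp [PySem.Dict.modify, h]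
  · simp only [Bool.not_eq_true] at h
    rw [pv_not_contains_getD depths k e h]
    simp [PySem.Dict.modify, h]

-- the dict built by A's loop over the filtered entries
def pvD (evs : List (List (String × Int))) : PySem.Dict Int (List (List (String × Int))) :=
  evs.foldl (fun d e => d.modify (pvKey e) [] (· ++ [e])) PySem.Dict.empty

theorem pvD_getD (evs : List (List (String × Int))) (c : Int) :
    (pvD evs).getD c [] = evs.filter (fun e => pvKey e == c) := by
  have h := PySem.Dict.getD_foldl_modify_append
      (l := evs.map (fun e => (pvKey e, e))) (d := PySem.Dict.empty) (c := c)
  simp only [List.foldl_map] at h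
  unfold pvD
  rw [h]
  simp [List.filter_map, Function.comp_def]

theorem pvD_keys (evs : List (List (String × Int))) :
    (pvD evs).keys = evs.foldl (fun ks e => PySem.Set.add ks (pvKey e)) ([] : PySem.Set Int) := by
  unfold pvD
  rw [PySem.Dict.keys_foldl_modify_key, ← PySem.Set.update_map_eq_foldl_add]
  simp [PySem.Dict.keys_empty]

theorem pvD_nodup (evs : List (List (String × Int))) : (pvD evs).keys.Nodup := by
  unfold pvD
  exact PySem.Dict.nodup_keys_foldl_modify_key _ _ _ _ _ (by simp [PySem.Dict.keys_empty])

-- ===== VERDICT (by name: the statement is the Claim_ definition above) =====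
theorem sort_depths_of_evaluation_py_spec : Claim_equal_sort_depths_of_evaluation_py := by
  intro move _ _
  unfold Spec_sort_depths_of_evaluation_py sort_depths_of_evaluation_py sort_depths_of_evaluation_py_alt
  cases h : (PySem.Dict.mk move).get? "evaluation" with
  | none => rfl
  | some evs0 =>
    simp only
    set evs := evs0.filter (fun e => (PySem.Dict.mk e).contains "Nodes") with hevs
    have hA : (evs0.foldl (fun depths e =>
        if (PySem.Dict.mk e).contains "Nodes" then
          let d := (PySem.Dict.mk e).getD "Nodes" 0
          if depths.contains d then depths.insert d (depths.getD d [] ++ [e])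
          else depths.insert d [e]
        else depths) PySem.Dict.empty) = pvD evs := by
      rw [show (fun (depths : PySem.Dict Int (List (List (String × Int)))) (e : List (String × Int)) =>
            if (PySem.Dict.mk e).contains "Nodes" then
              let d := (PySem.Dict.mk e).getD "Nodes" 0
              if depths.contains d then depths.insert d (depths.getD d [] ++ [e])
              else depths.insert d [e]
            else depths)
          = (fun depths e => if (PySem.Dict.mk e).contains "Nodes" then
              depths.modify (pvKey e) [] (· ++ [e]) else depths) from by
        funext depths e
        simp only [pv_branch_eq_modify, pvKey]]
      rw [pv_foldl_guard, ← hevs]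
      rfl
    rw [hA]
    rw [PySem.Dict.items_eq_map_keys (pvD evs) (pvD_nodup evs) []]
    rw [pvD_keys]
    exact List.map_congr_left (fun k _ => by rw [pvD_getD]; simp [pvKey])
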